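-- pv_equiv track=rewrite | github.com/mellery/project_euler | euler61.py | get_hex
-- ===== SOURCE A (Python) =====
-- def get_hex(limit):
--     results = []
--     i = 1
--     while(1):
--         n = i*(2*i-1)
--         i = i + 1
--         if n < limit:
--             if n >= 1000:
--                 results.append(n)
--         else:
--             return results
-- ===== SOURCE B (Python) =====
-- def get_hex(limit):
--     # Binary search for the largest index whose hexagonal number is below limit,
--     # then emit the hexagonal numbers for indices 23..that index in one comprehension.
--     if limit <= 1035:
--         return []
--     lo, hi = 1, limit
--     while hi - lo > 1:
--         mid = (lo + hi) // 2
--         if mid * (2 * mid - 1) < limit: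
--             lo = mid
--         else:
--             hi = mid
--     return [i * (2 * i - 1) for i in range(23, lo + 1)]
-- ===== Notes on version B (the rewrite author's own statement) =====
-- stated objective: alternative
-- what changed: Replaces the linear scan that generates successive hexagonal numbers and tests each against the window with a binary search for the largest index whose hexagonal number is below limit, then a single comprehension over the qualifying index range.
import Mathlib
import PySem

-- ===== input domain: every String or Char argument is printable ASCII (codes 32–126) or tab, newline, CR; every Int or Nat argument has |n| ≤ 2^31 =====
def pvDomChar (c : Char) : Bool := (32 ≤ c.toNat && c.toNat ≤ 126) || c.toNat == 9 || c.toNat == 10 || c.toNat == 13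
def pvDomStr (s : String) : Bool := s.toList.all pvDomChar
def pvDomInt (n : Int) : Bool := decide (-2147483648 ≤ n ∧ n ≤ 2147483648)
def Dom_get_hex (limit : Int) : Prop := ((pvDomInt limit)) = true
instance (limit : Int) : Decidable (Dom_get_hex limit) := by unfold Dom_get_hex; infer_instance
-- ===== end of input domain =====

-- B replaces A's linear scan by a binary search for the last hexagonal index below limit
-- plus one comprehension (objective: alternative decomposition, same results).

-- ===== PORT A =====
-- A's while(1) loop; Python's i starts at 1 and only ever increments, kept as a Nat here.
def get_hexLoop (limit : Int) (results : List Int) (i : Nat) : List Int :=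
  let n : Int := (i : Int) * (2 * (i : Int) - 1)
  if n < limit then
    get_hexLoop limit (if 1000 ≤ n then results ++ [n] else results) (i + 1)
  else results
termination_by (limit - (i : Int) * (2 * (i : Int) - 1)).toNat
decreasing_by
  have h1 : (((i : Nat) + 1 : Nat) : Int) * (2 * (((i : Nat) + 1 : Nat) : Int) - 1)
      = (i : Int) * (2 * (i : Int) - 1) + (4 * (i : Int) + 1) := by push_cast; ring
  omega

def get_hex (limit : Int) : List Int := get_hexLoop limit [] 1

-- ===== PORT B =====
-- B's while-loop: binary search for the largest lo with lo*(2*lo-1) < limit.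
def get_hexSearch (limit lo hi : Int) : Int :=
  if hi - lo > 1 then
    let mid := PySem.Int.floordiv (lo + hi) 2
    if mid * (2 * mid - 1) < limit then get_hexSearch limit mid hi
    else get_hexSearch limit lo mid
  else lo
termination_by (hi - lo).toNat
decreasing_by
  all_goals
    rename_i hgt _
    have hmid1 : lo + 1 ≤ PySem.Int.floordiv (lo + hi) 2 := by
      rw [PySem.Int.le_floordiv_iff_mul_le (by norm_num)]; omega
    have hmid2 : PySem.Int.floordiv (lo + hi) 2 < hi := by
      rw [PySem.Int.floordiv_lt_iff_lt_mul (by norm_num)]; omega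
    omega

def get_hex_alt (limit : Int) : List Int :=
  if limit ≤ 1035 then []
  else
    let lo := get_hexSearch limit 1 limit
    (PySem.List.pyRange 23 (lo + 1) 1).map (fun i => i * (2 * i - 1))

-- ===== PRECONDITION & SPEC =====
def Spec_get_hex (limit : Int) (out : List Int) : Prop := out = get_hex_alt limit
instance (limit : Int) (out : List Int) : Decidable (Spec_get_hex limit out) := by unfold Spec_get_hex; infer_instance

-- ===== CLAIM (what is proved, stated in full; the proofs are below) =====
def Claim_equal_get_hex : Prop := ∀ (limit : Int), Dom_get_hex limit → Spec_get_hex limit (get_hex limit)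

-- ===== LEMMAS AND PROOFS =====

-- strict monotonicity of the hexagonal map on nonnegative arguments
theorem hexMono {a b : Int} (ha : 0 ≤ a) (hab : a < b) :
    a * (2 * a - 1) < b * (2 * b - 1) := by nlinarith

theorem hexMono' {a b : Int} (ha : 0 ≤ a) (hab : a ≤ b) :
    a * (2 * a - 1) ≤ b * (2 * b - 1) := by
  rcases lt_or_eq_of_le hab with h | h
  · exact le_of_lt (hexMono ha h)
  · subst h; exact le_refl _

-- the binary search returns the largest index whose hexagonal number is below limit
theorem search_spec (limit : Int) : ∀ (k : Nat) (lo hi : Int), (hi - lo).toNat = k →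
    lo * (2 * lo - 1) < limit → ¬ hi * (2 * hi - 1) < limit → lo + 1 ≤ hi →
    lo ≤ get_hexSearch limit lo hi ∧
    (get_hexSearch limit lo hi) * (2 * (get_hexSearch limit lo hi) - 1) < limit ∧
    ¬ (get_hexSearch limit lo hi + 1) * (2 * (get_hexSearch limit lo hi + 1) - 1) < limit := by
  intro k
  induction k using Nat.strong_induction_on with
  | _ k ih =>
    intro lo hi hk hlo hhi hlohi
    rw [get_hexSearch]
    by_cases hgt : hi - lo > 1
    · have hmid1 : lo + 1 ≤ PySem.Int.floordiv (lo + hi) 2 := by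
        rw [PySem.Int.le_floordiv_iff_mul_le (by norm_num)]; omega
      have hmid2 : PySem.Int.floordiv (lo + hi) 2 < hi := by
        rw [PySem.Int.floordiv_lt_iff_lt_mul (by norm_num)]; omega
      simp only [hgt, if_true]
      by_cases hmidlt : (PySem.Int.floordiv (lo + hi) 2) * (2 * (PySem.Int.floordiv (lo + hi) 2) - 1) < limit
      · simp only [hmidlt, if_true]
        have := ih (hi - PySem.Int.floordiv (lo + hi) 2).toNat (by omega)
          (PySem.Int.floordiv (lo + hi) 2) hi rfl hmidlt hhi (by omega)
        exact ⟨by omega, this.2.1, this.2.2⟩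
      · simp only [hmidlt, if_false]
        exact ih (PySem.Int.floordiv (lo + hi) 2 - lo).toNat (by omega)
          lo (PySem.Int.floordiv (lo + hi) 2) rfl hlo hmidlt (by omega)
    · simp only [hgt, if_false]
      have hhe : hi = lo + 1 := by omega
      exact ⟨le_refl _, hlo, by rw [← hhe]; exact hhi⟩

-- below-threshold case: if limit ≤ 1035 no hexagonal number lands in [1000, limit)
theorem loop_empty (limit : Int) (hlim : limit ≤ 1035) :
    ∀ (res : List Int) (i : Nat), 1 ≤ i → get_hexLoop limit res i = res := by
  intro res i
  induction res, i using get_hexLoop.induct limit with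
  | case1 res i n hlt ih =>
    intro hi
    have hlt' : (i : Int) * (2 * (i : Int) - 1) < limit := hlt
    rw [get_hexLoop]
    simp only [hlt', if_true]
    have hnot : ¬ (1000 : Int) ≤ (i : Int) * (2 * (i : Int) - 1) := by
      intro h1000
      by_cases h23 : 23 ≤ i
      · have : (23 : Int) * (2 * 23 - 1) ≤ (i : Int) * (2 * (i : Int) - 1) :=
          hexMono' (by norm_num) (by exact_mod_cast h23)
        norm_num at this; omega
      · have : (i : Int) * (2 * (i : Int) - 1) ≤ (22 : Int) * (2 * 22 - 1) :=
          hexMono' (Int.natCast_nonneg i) (by omega)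
        norm_num at this; omega
    simp only [hnot, if_false]
    have h' := ih (by omega)
    simp only [n] at h'
    rw [dif_neg hnot] at h'
    exact h'
  | case2 res i n hge =>
    intro _
    have hge' : ¬ (i : Int) * (2 * (i : Int) - 1) < limit := hge
    rw [get_hexLoop]
    simp only [hge', if_false]

-- A's loop, characterised by the largest index r whose hexagonal number is below limit
theorem loop_spec (limit : Int) (r : Int)
    (hr : r * (2 * r - 1) < limit)
    (hr1 : ¬ (r + 1) * (2 * (r + 1) - 1) < limit) :
    ∀ (k : Nat) (i : Nat) (res : List Int), (r + 1 - (i : Int)).toNat = k →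
    1 ≤ (i : Int) → (i : Int) ≤ r + 1 →
    get_hexLoop limit res i =
      res ++ (PySem.List.pyRange (max (i : Int) 23) (r + 1) 1).map (fun j => j * (2 * j - 1)) := by
  intro k
  induction k using Nat.strong_induction_on with
  | _ k ih =>
    intro i res hk h1 hir
    by_cases hcase : (i : Int) ≤ r
    · -- the loop takes another step
      have h0 : (0 : Int) ≤ (i : Int) := Int.natCast_nonneg i
      have hlt : (i : Int) * (2 * (i : Int) - 1) < limit :=
        lt_of_le_of_lt (hexMono' h0 hcase) hr
      rw [get_hexLoop]
      simp only [hlt, if_true]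
      have hstep := ih (r + 1 - ((i : Int) + 1)).toNat (by omega) (i + 1)
        (if 1000 ≤ (i : Int) * (2 * (i : Int) - 1) then res ++ [(i : Int) * (2 * (i : Int) - 1)] else res)
        (by push_cast; omega) (by push_cast; omega) (by push_cast; omega)
      push_cast at hstep
      rw [hstep]
      by_cases h23 : (23 : Int) ≤ (i : Int)
      · have hge : (1000 : Int) ≤ (i : Int) * (2 * (i : Int) - 1) := by
          have : (23 : Int) * (2 * 23 - 1) ≤ (i : Int) * (2 * (i : Int) - 1) :=
            hexMono' (by norm_num) h23
          norm_num at this; omega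
        have hmax : max (i : Int) 23 = (i : Int) := by omega
        have hmax' : max ((i : Int) + 1) 23 = (i : Int) + 1 := by omega
        rw [hmax, hmax', if_pos hge,
          show PySem.List.pyRange (i : Int) (r + 1) 1
              = (i : Int) :: PySem.List.pyRange ((i : Int) + 1) (r + 1) 1 from
            PySem.List.pyRange_one_cons (by omega)]
        simp [List.append_assoc]
      · have hlt1000 : ¬ (1000 : Int) ≤ (i : Int) * (2 * (i : Int) - 1) := by
          have : (i : Int) * (2 * (i : Int) - 1) ≤ (22 : Int) * (2 * 22 - 1) :=
            hexMono' h0 (by omega)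
          norm_num at this; omega
        have hmax : max (i : Int) 23 = 23 := by omega
        have hmax' : max ((i : Int) + 1) 23 = 23 := by omega
        rw [hmax, hmax']
        simp [hlt1000]
    · -- i = r + 1 : the loop stops and the range is empty
      have hie : (i : Int) = r + 1 := by omega
      rw [get_hexLoop]
      have hstop : ¬ (i : Int) * (2 * (i : Int) - 1) < limit := by rw [hie]; exact hr1
      simp only [hstop, if_false]
      rw [PySem.List.pyRange_one_eq_nil (by omega)]
      simp

-- ===== VERDICT (by name: the statement is the Claim_ definition above) =====
theorem get_hex_spec : Claim_equal_get_hex := by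
  intro limit _
  unfold Spec_get_hex get_hex get_hex_alt
  by_cases hsmall : limit ≤ 1035
  · simp only [hsmall, if_true]
    exact loop_empty limit hsmall [] 1 (by omega)
  · simp only [hsmall, if_false]
    have hbig : (1036 : Int) ≤ limit := by omega
    have h1 : (1 : Int) * (2 * 1 - 1) < limit := by omega
    have hL : ¬ limit * (2 * limit - 1) < limit := by nlinarith
    obtain ⟨hlo, hvlt, hvge⟩ :=
      search_spec limit (limit - 1).toNat 1 limit (by omega) h1 hL (by omega)
    have := loop_spec limit (get_hexSearch limit 1 limit) hvlt hvge
      (get_hexSearch limit 1 limit).toNat 1 [] (by omega) (by norm_num) (by omega)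
    rw [this]
    have hmax : max ((1 : Nat) : Int) 23 = 23 := by norm_num
    rw [hmax]
    simp
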